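-- pv_equiv track=rewrite | github.com/ncarrezdev/OwnSuite | OwnSuite/A_Classes/E_Functional/Compression.py | arr_to_int
-- ===== SOURCE A (Python) =====
-- def arr_to_int(int_array):
--     res = 0
--     for i in range(len(int_array)):
--         res *= 10
--         if(int_array[i] in range(0,2) or
--            int_array[i] in range(10,16)):
--             res *= 10
--         res += int_array[i]
--     return res
-- ===== SOURCE B (Python) =====
-- def arr_to_int(int_array):
--     res = 0
--     mult = 1
--     for x in reversed(int_array):
--         res += x * mult
--         mult *= 100 if (x in range(0, 2) or x in range(10, 16)) else 10
--     return res
-- ===== Notes on version B (the rewrite author's own statement) =====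
-- stated objective: alternative
-- what changed: B walks the array from the right accumulating a place-value sum res += x*mult with an explicit running multiplier, instead of A's left-to-right Horner fold that rescales the accumulator before each element.
import Mathlib
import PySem

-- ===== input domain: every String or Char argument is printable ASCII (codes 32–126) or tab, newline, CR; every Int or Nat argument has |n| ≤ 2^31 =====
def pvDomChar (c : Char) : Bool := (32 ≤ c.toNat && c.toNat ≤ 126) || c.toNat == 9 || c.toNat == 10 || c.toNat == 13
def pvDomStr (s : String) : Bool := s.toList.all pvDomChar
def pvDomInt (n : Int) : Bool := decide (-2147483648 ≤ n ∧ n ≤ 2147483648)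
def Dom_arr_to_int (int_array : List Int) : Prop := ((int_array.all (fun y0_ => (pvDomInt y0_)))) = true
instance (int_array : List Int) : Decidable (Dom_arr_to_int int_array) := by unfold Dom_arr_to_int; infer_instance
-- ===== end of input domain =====

-- ===== PORT A =====
-- Header: B re-traverses the array from the right with an explicit place-value multiplier instead of A's left-to-right Horner rescaling; objective: alternative (same O(n) cost).
def pyWide (x : Int) : Bool := (0 ≤ x && x < 2) || (10 ≤ x && x < 16)

def arr_to_int (int_array : List Int) : Int :=
  (PySem.List.pyRange 0 int_array.length 1).foldl
    (fun res i =>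
      let x := PySem.List.pyGetD int_array i 0   -- int_array[i], index always in range
      let res := res * 10
      let res := if pyWide x then res * 10 else res
      res + x)
    0

-- ===== PORT B =====
def arr_to_int_alt (int_array : List Int) : Int :=
  (int_array.reverse.foldl
    (fun (p : Int × Int) x =>
      (p.1 + x * p.2, p.2 * (if pyWide x then 100 else 10)))
    (0, 1)).1

-- ===== PRECONDITION & SPEC =====
def Spec_arr_to_int (int_array : List Int) (out : Int) : Prop := out = arr_to_int_alt int_array
instance (int_array : List Int) (out : Int) : Decidable (Spec_arr_to_int int_array out) := by unfold Spec_arr_to_int; infer_instance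

-- ===== CLAIM (what is proved, stated in full; the proofs are below) =====
def Claim_equal_arr_to_int : Prop := ∀ (int_array : List Int), Dom_arr_to_int int_array → Spec_arr_to_int int_array (arr_to_int int_array)

-- ===== LEMMAS AND PROOFS =====

-- ===== VERDICT (by name: the statement is the Claim_ definition above) =====
-- step function of A's loop, on the element value
def stepA (res x : Int) : Int :=
  let r := res * 10
  let r := if pyWide x then r * 10 else r
  r + x

theorem stepA_eq (res x : Int) :
    stepA res x = res * (if pyWide x then 100 else 10) + x := by
  unfold stepA; split_ifs <;> ring

-- A's fold equals r * (final multiplier) + B's sum, for any initial accumulator r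
theorem foldA_eq (xs : List Int) : ∀ r : Int,
    xs.foldl stepA r =
      r * (xs.foldr (fun x (p : Int × Int) =>
            (p.1 + x * p.2, p.2 * (if pyWide x then 100 else 10))) (0, 1)).2
        + (xs.foldr (fun x (p : Int × Int) =>
            (p.1 + x * p.2, p.2 * (if pyWide x then 100 else 10))) (0, 1)).1 := by
  induction xs with
  | nil => intro r; simp
  | cons x xs ih =>
      intro r
      simp only [List.foldl_cons, List.foldr_cons, stepA_eq, ih]
      ring

theorem arr_to_int_spec : Claim_equal_arr_to_int := by
  intro int_array _
  unfold Spec_arr_to_int arr_to_int arr_to_int_alt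
  rw [show (fun res i =>
        let x := PySem.List.pyGetD int_array i 0
        let res := res * 10
        let res := if pyWide x then res * 10 else res
        res + x) = (fun res i => stepA res (PySem.List.pyGetD int_array i 0)) from rfl]
  rw [PySem.List.foldl_pyRange_zero_pyGetD' int_array 0 stepA 0]
  rw [List.foldl_reverse]
  have := foldA_eq int_array 0
  simpa [stepA] using this
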